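-- pv_equiv track=rewrite | github.com/mfchen0703/grid-puzzle-experiment | experiment2/generate_rounds_json.py | has_solution_within_k_changes
-- ===== SOURCE A (Python) =====
-- import itertools
--
-- COLORS = ["#377eb8", "#4daf4a", "#984ea3", "#ffff33"]
--
-- def get_conflict_edges(adjacency, colors):
--     conflicts = []
--     for region in range(len(colors)):
--         for neighbor in adjacency[region]:
--             if region < neighbor and colors[region] == colors[neighbor]:
--                 conflicts.append([region, neighbor])
--     return conflicts
--
-- def is_legal_state(adjacency, colors):
--     return len(get_conflict_edges(adjacency, colors)) == 0
--
-- def has_solution_within_k_changes(adjacency, initial_colors, max_changes, region_ids):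
--
--     for n_changes in range(1, max_changes + 1):
--         for changed_regions in itertools.combinations(region_ids, n_changes):
--             alternative_colors = [
--                 [c for c in range(len(COLORS)) if c != initial_colors[region]]
--                 for region in changed_regions
--             ]
--             for new_colors in itertools.product(*alternative_colors):
--                 candidate = list(initial_colors)
--                 for region, color in zip(changed_regions, new_colors):
--                     candidate[region] = color
--                 if is_legal_state(adjacency, candidate):
--                     return True
--     return False
-- ===== SOURCE B (Python) =====
-- def has_solution_within_k_changes(adjacency, initial_colors, max_changes, region_ids):
--     def legal(colors):
--         return all(not (r < nb and colors[r] == colors[nb])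
--                    for r in range(len(colors)) for nb in adjacency[r])
--
--     def go(i, cand, ch):
--         if i == len(region_ids):
--             return ch >= 1 and legal(cand)
--         # option 1: keep this region's current color
--         if go(i + 1, cand, ch):
--             return True
--         # option 2: recolor it (one of the three colors != its initial color)
--         if ch < max_changes:
--             r = region_ids[i]
--             for c in [c for c in range(4) if c != initial_colors[r]]:
--                 new = list(cand)
--                 new[r] = c
--                 if go(i + 1, new, ch + 1):
--                     return True
--         return False
--
--     return go(0, list(initial_colors), 0)
-- ===== Notes on version B (the rewrite author's own statement) =====
-- stated objective: alternative
-- what changed: Replaced A's enumeration of change-set sizes via itertools.combinations and itertools.product with a recursive keep-or-recolor backtracking search over region_ids carrying the candidate coloring and change count, with an all()-based legality test instead of building the conflict-edge list.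
-- outside the precondition, e.g. on has_solution_within_k_changes([[1], [0]], [0, 1], 1, [0, 99]): A returns True, B raises IndexError
import Mathlib
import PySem

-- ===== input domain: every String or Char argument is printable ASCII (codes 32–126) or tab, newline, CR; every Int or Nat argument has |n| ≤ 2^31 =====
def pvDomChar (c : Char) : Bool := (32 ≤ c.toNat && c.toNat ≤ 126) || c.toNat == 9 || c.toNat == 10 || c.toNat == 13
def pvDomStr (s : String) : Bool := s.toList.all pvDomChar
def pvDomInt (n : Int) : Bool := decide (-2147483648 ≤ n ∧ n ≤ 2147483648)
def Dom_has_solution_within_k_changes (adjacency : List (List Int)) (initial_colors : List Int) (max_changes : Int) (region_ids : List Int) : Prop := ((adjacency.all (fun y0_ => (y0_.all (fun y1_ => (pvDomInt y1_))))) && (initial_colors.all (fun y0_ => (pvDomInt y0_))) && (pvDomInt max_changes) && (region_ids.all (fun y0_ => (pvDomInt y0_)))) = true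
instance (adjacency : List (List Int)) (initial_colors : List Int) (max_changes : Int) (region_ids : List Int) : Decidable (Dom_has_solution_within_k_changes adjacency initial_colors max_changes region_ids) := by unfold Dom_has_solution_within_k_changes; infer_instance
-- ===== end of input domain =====

-- B replaces A's combinations/product enumeration of change sets by a recursive keep-or-recolor
-- backtracking search over region_ids (objective: alternative algorithm, same cost class).
-- Both ports are exact on Pre_; outside Pre_ the Python raises IndexError (total default values here).

-- ===== PORT A =====
-- xs[i] with a default (Pre_ keeps every used index in range, where Python returns the same value)
def pvGetD (xs : List Int) (i : Int) : Int := (PySem.List.pyGet? xs i).getD 0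
def pvGetRowD (xs : List (List Int)) (i : Int) : List Int := (PySem.List.pyGet? xs i).getD []

def get_conflict_edges (adjacency : List (List Int)) (colors : List Int) : List (List Int) :=
  (PySem.List.pyRange 0 (colors.length : Int) 1).foldl (fun acc region =>
    (pvGetRowD adjacency region).foldl (fun acc2 nb =>
      if region < nb ∧ pvGetD colors region = pvGetD colors nb then acc2 ++ [[region, nb]] else acc2)
      acc) []

def is_legal_state (adjacency : List (List Int)) (colors : List Int) : Bool :=
  (get_conflict_edges adjacency colors).length == 0

-- [[c for c in range(len(COLORS)) if c != initial_colors[region]] for region in changed]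
def pvAltColors (initial_colors : List Int) (changed : List Int) : List (List Int) :=
  changed.map (fun region => (PySem.List.pyRange 0 4 1).filter (fun c => c ≠ pvGetD initial_colors region))

-- candidate = list(initial_colors); for region, color in zip(changed, cs): candidate[region] = color
def pvApplyZip (changed cs : List Int) (cand : List Int) : List Int :=
  (changed.zip cs).foldl (fun cand p => PySem.List.pySetD cand p.1 p.2) cand

def has_solution_within_k_changes (adjacency : List (List Int)) (initial_colors : List Int) (max_changes : Int) (region_ids : List Int) : Bool :=
  (PySem.List.pyRange 1 (max_changes + 1) 1).any fun n =>
    -- itertools.combinations(region_ids, n) ported as List.sublistsLen (same tuples; early 'return True' = any)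
    (List.sublistsLen n.toNat region_ids).any fun changed =>
      -- itertools.product(*alternative_colors) ported as List.sections
      ((pvAltColors initial_colors changed).sections).any fun cs =>
        is_legal_state adjacency (pvApplyZip changed cs initial_colors)

-- ===== PORT B =====
-- all(not (r < nb and colors[r] == colors[nb]) for r in range(len(colors)) for nb in adjacency[r])
def pvLegalB (adjacency : List (List Int)) (colors : List Int) : Bool :=
  (PySem.List.pyRange 0 (colors.length : Int) 1).all fun r =>
    (pvGetRowD adjacency r).all fun nb =>
      !(decide (r < nb) && (pvGetD colors r == pvGetD colors nb))

-- go(i, cand, ch): recursion over the remaining suffix of region_ids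
def pvGo (adjacency : List (List Int)) (initial_colors : List Int) (max_changes : Int)
    (rest : List Int) (cand : List Int) (ch : Int) : Bool :=
  match rest with
  | [] => decide (1 ≤ ch) && pvLegalB adjacency cand
  | r :: rs =>
    pvGo adjacency initial_colors max_changes rs cand ch ||
    (if ch < max_changes then
      ((PySem.List.pyRange 0 4 1).filter (fun c => c ≠ pvGetD initial_colors r)).any fun c =>
        pvGo adjacency initial_colors max_changes rs (PySem.List.pySetD cand r c) (ch + 1)
     else false)

def has_solution_within_k_changes_alt (adjacency : List (List Int)) (initial_colors : List Int) (max_changes : Int) (region_ids : List Int) : Bool :=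
  pvGo adjacency initial_colors max_changes region_ids initial_colors 0

-- ===== PRECONDITION & SPEC =====
-- Pre_ excludes exactly the inputs that can make Python index out of range: whenever the search
-- actually builds a candidate (max_changes ≥ 1 and region_ids nonempty), every region id must be a
-- valid index into initial_colors, adjacency must cover every region, and every checked neighbor
-- (those with region < neighbor) must be a valid region. A may still RETURN on a few such inputs by
-- exiting early before reaching a bad index (see the cite in claim.json); B raises there.
def Pre_has_solution_within_k_changes (adjacency : List (List Int)) (initial_colors : List Int) (max_changes : Int) (region_ids : List Int) : Prop :=
  (1 ≤ max_changes ∧ region_ids ≠ []) →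
    ((∀ r ∈ region_ids, PySem.Raise.InRange initial_colors.length r) ∧
     initial_colors.length ≤ adjacency.length ∧
     (∀ i < initial_colors.length, ∀ nb ∈ adjacency.getD i [], (i : Int) < nb → nb < (initial_colors.length : Int)))
instance (adjacency : List (List Int)) (initial_colors : List Int) (max_changes : Int) (region_ids : List Int) : Decidable (Pre_has_solution_within_k_changes adjacency initial_colors max_changes region_ids) := by unfold Pre_has_solution_within_k_changes; infer_instance

def pvWitness_has_solution_within_k_changes : List (List Int) × List Int × Int × List Int :=
  ([[1], [0]], [0, 0], 1, [0, 1])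

def Spec_has_solution_within_k_changes (adjacency : List (List Int)) (initial_colors : List Int) (max_changes : Int) (region_ids : List Int) (out : Bool) : Prop := out = has_solution_within_k_changes_alt adjacency initial_colors max_changes region_ids
instance (adjacency : List (List Int)) (initial_colors : List Int) (max_changes : Int) (region_ids : List Int) (out : Bool) : Decidable (Spec_has_solution_within_k_changes adjacency initial_colors max_changes region_ids out) := by unfold Spec_has_solution_within_k_changes; infer_instance

-- ===== CLAIM (what is proved, stated in full; the proofs are below) =====
def Claim_equal_has_solution_within_k_changes : Prop := ∀ (adjacency : List (List Int)) (initial_colors : List Int) (max_changes : Int) (region_ids : List Int), Dom_has_solution_within_k_changes adjacency initial_colors max_changes region_ids → Pre_has_solution_within_k_changes adjacency initial_colors max_changes region_ids → Spec_has_solution_within_k_changes adjacency initial_colors max_changes region_ids (has_solution_within_k_changes adjacency initial_colors max_changes region_ids)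

-- ===== LEMMAS AND PROOFS =====

-- applying a list of (region, color) assignments left to right
def pvApply (ps : List (Int × Int)) (cand : List Int) : List Int :=
  ps.foldl (fun cand p => PySem.List.pySetD cand p.1 p.2) cand

-- the common search space: an order-preserving selection of regions from rids with legal new colors
def pvS (adjacency : List (List Int)) (initial_colors : List Int) (max_changes : Int)
    (rids : List Int) (cand : List Int) (ch : Int) : Prop :=
  ∃ ps : List (Int × Int),
    List.Sublist (ps.map Prod.fst) rids ∧
    (∀ p ∈ ps, p.2 ∈ (PySem.List.pyRange 0 4 1).filter (fun c => c ≠ pvGetD initial_colors p.1)) ∧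
    1 ≤ ch + (ps.length : Int) ∧ ch + (ps.length : Int) ≤ max_changes ∧
    pvLegalB adjacency (pvApply ps cand) = true

theorem pvLegal_eq (adjacency : List (List Int)) (colors : List Int) :
    is_legal_state adjacency colors = pvLegalB adjacency colors := by
  unfold is_legal_state get_conflict_edges pvLegalB
  have hinner : ∀ (acc : List (List Int)) (region : Int),
      (pvGetRowD adjacency region).foldl (fun acc2 nb =>
        if region < nb ∧ pvGetD colors region = pvGetD colors nb then acc2 ++ [[region, nb]] else acc2) acc
      = acc ++ ((pvGetRowD adjacency region).filter
          (fun nb => decide (region < nb ∧ pvGetD colors region = pvGetD colors nb))).map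
          (fun nb => [region, nb]) := by
    intro acc region
    exact PySem.List.foldl_append_ite _ _ _ _
  simp only [hinner]
  rw [PySem.List.foldl_append_eq_flatMap]
  rw [Bool.eq_iff_iff]
  simp [List.all_eq_true, List.sum_eq_zero_iff, PySem.List.mem_pyRange_one]
  constructor
  · intro h x hx0 hxl nb hnb
    have hlen := h _ x hx0 hxl rfl
    rw [List.length_eq_zero_iff, List.filter_eq_nil_iff] at hlen
    have := hlen nb hnb
    simp only [Bool.and_eq_true, decide_eq_true_eq, not_and] at this
    by_cases hlt : x < nb
    · exact Or.inr (this hlt)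
    · exact Or.inl (by omega)
  · intro h n x hx0 hxl hlen
    rw [← hlen, List.length_eq_zero_iff, List.filter_eq_nil_iff]
    intro nb hnb
    have := h x hx0 hxl nb hnb
    simp only [Bool.and_eq_true, decide_eq_true_eq, not_and]
    intro hlt
    rcases this with h1 | h2
    · omega
    · exact h2


theorem pvS_cons (adjacency : List (List Int)) (initial_colors : List Int) (max_changes : Int)
    (r : Int) (rs : List Int) (cand : List Int) (ch : Int) :
    pvS adjacency initial_colors max_changes (r :: rs) cand ch ↔
      pvS adjacency initial_colors max_changes rs cand ch ∨
      (ch < max_changes ∧ ∃ c ∈ (PySem.List.pyRange 0 4 1).filter (fun c => c ≠ pvGetD initial_colors r),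
        pvS adjacency initial_colors max_changes rs (PySem.List.pySetD cand r c) (ch + 1)) := by
  constructor
  · rintro ⟨ps, hsub, hval, h1, h2, hleg⟩
    rcases List.sublist_cons_iff.mp hsub with hsub' | ⟨t, hmap, ht⟩
    · exact Or.inl ⟨ps, hsub', hval, h1, h2, hleg⟩
    · match ps, hmap with
      | (r', c) :: ps', hmap =>
        simp only [List.map_cons, List.cons.injEq] at hmap
        obtain ⟨rfl, rfl⟩ := hmap
        refine Or.inr ⟨by simp at h2; omega, c, hval _ (List.mem_cons_self), ps', ht,
          fun p hp => hval p (List.mem_cons_of_mem _ hp), ?_, ?_, hleg⟩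
        · simp only [List.length_cons] at h1 ⊢; push_cast at h1 ⊢; omega
        · simp only [List.length_cons] at h2 ⊢; push_cast at h2 ⊢; omega
  · rintro (⟨ps, hsub, hval, h1, h2, hleg⟩ | ⟨hk, c, hc, ps', hsub, hval, h1, h2, hleg⟩)
    · exact ⟨ps, List.Sublist.cons _ hsub, hval, h1, h2, hleg⟩
    · refine ⟨(r, c) :: ps', List.Sublist.cons₂ _ hsub, ?_, ?_, ?_, hleg⟩
      · intro p hp
        rcases List.mem_cons.mp hp with rfl | hp'
        · exact hc
        · exact hval p hp'
      · simp; omega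
      · simp at h2 ⊢; omega

theorem pvGo_iff (adjacency : List (List Int)) (initial_colors : List Int) (max_changes : Int)
    (rids : List Int) (cand : List Int) (ch : Int) (h : 1 ≤ ch → ch ≤ max_changes) :
    pvGo adjacency initial_colors max_changes rids cand ch = true ↔
      pvS adjacency initial_colors max_changes rids cand ch := by
  induction rids generalizing cand ch with
  | nil =>
    simp only [pvGo, Bool.and_eq_true, decide_eq_true_eq]
    constructor
    · rintro ⟨h1, hleg⟩
      exact ⟨[], by simp, by simp, by simpa using h1, by simpa using h h1, hleg⟩
    · rintro ⟨ps, hsub, -, h1, h2, hleg⟩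
      have : ps = [] := by simpa using List.sublist_nil.mp (by simpa using hsub)
      subst this
      exact ⟨by simpa using h1, hleg⟩
  | cons r rs ih =>
    rw [pvS_cons]
    simp only [pvGo, Bool.or_eq_true]
    rw [ih cand ch h]
    by_cases hk : ch < max_changes
    · simp only [if_pos hk, List.any_eq_true]
      constructor
      · rintro (hS | ⟨c, hc, hgo⟩)
        · exact Or.inl hS
        · exact Or.inr ⟨hk, c, hc, (ih _ _ (fun _ => by omega)).mp hgo⟩
      · rintro (hS | ⟨-, c, hc, hS⟩)
        · exact Or.inl hS
        · exact Or.inr ⟨c, hc, (ih _ _ (fun _ => by omega)).mpr hS⟩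
    · simp [hk]


theorem pvForall₂_iff (init : List Int) (changed : List Int) : ∀ cs : List Int,
    List.Forall₂ (· ∈ ·) cs (pvAltColors init changed) ↔
      (cs.length = changed.length ∧
        ∀ p ∈ changed.zip cs, p.2 ∈ (PySem.List.pyRange 0 4 1).filter (fun c => c ≠ pvGetD init p.1)) := by
  induction changed with
  | nil => intro cs; simp [pvAltColors]
  | cons r rest ih =>
    intro cs
    cases cs with
    | nil => simp [pvAltColors]
    | cons c cs' =>
      simp only [pvAltColors, List.map_cons, List.forall₂_cons, List.zip_cons_cons,
        List.length_cons, List.mem_cons]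
      rw [show (List.map (fun region => (PySem.List.pyRange 0 4 1).filter
            (fun c => c ≠ pvGetD init region)) rest) = pvAltColors init rest from rfl, ih cs']
      constructor
      · rintro ⟨hc, hlen, hall⟩
        refine ⟨by omega, ?_⟩
        rintro p (rfl | hp)
        · exact hc
        · exact hall p hp
      · rintro ⟨hlen, hall⟩
        exact ⟨hall _ (Or.inl rfl), by omega, fun p hp => hall p (Or.inr hp)⟩

theorem pvA_iff (adjacency : List (List Int)) (initial_colors : List Int) (max_changes : Int)
    (rids : List Int) :
    has_solution_within_k_changes adjacency initial_colors max_changes rids = true ↔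
      pvS adjacency initial_colors max_changes rids initial_colors 0 := by
  unfold has_solution_within_k_changes
  simp only [List.any_eq_true, PySem.List.mem_pyRange_one, List.mem_sublistsLen,
    List.mem_sections, pvLegal_eq]
  constructor
  · rintro ⟨n, ⟨hn1, hn2⟩, changed, ⟨hsub, hlen⟩, cs, hf, hleg⟩
    obtain ⟨hcl, hzip⟩ := (pvForall₂_iff initial_colors changed cs).mp hf
    refine ⟨changed.zip cs, ?_, hzip, ?_, ?_, hleg⟩
    · rw [List.map_fst_zip (by omega)]
      exact hsub
    · rw [List.length_zip]; omega
    · rw [List.length_zip]; omega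
  · rintro ⟨ps, hsub, hval, h1, h2, hleg⟩
    refine ⟨(ps.length : Int), ⟨by omega, by omega⟩, ps.map Prod.fst, ⟨hsub, by simp⟩,
      ps.map Prod.snd, ?_, ?_⟩
    · rw [pvForall₂_iff]
      refine ⟨by simp, ?_⟩
      have hz : (ps.map Prod.fst).zip (ps.map Prod.snd) = ps := by
        have := List.zip_unzip ps; rwa [List.unzip_eq_map] at this
      rw [hz]; exact hval
    · have hz : (ps.map Prod.fst).zip (ps.map Prod.snd) = ps := by
        have := List.zip_unzip ps; rwa [List.unzip_eq_map] at this
      show pvLegalB adjacency (pvApplyZip _ _ _) = true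
      unfold pvApplyZip
      rw [hz]
      exact hleg


-- ===== VERDICT (by name: the statement is the Claim_ definition above) =====
theorem has_solution_within_k_changes_spec : Claim_equal_has_solution_within_k_changes := by
  intro adjacency initial_colors max_changes region_ids _ _
  unfold Spec_has_solution_within_k_changes has_solution_within_k_changes_alt
  rw [Bool.eq_iff_iff, pvA_iff, pvGo_iff]
  omega
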